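-- pv_equiv track=rewrite | github.com/maorsarusi/python_pycharm | functional programing/תרגיל 4/targil4_2/targil4_2.py | treatLine
-- ===== SOURCE A (Python) =====
-- def treatLine(lineNr,line):
--     keys = line.split()
--     vowels =  listOfSentence(keys,crateListVByWord)
--     tup = enterToATuple(vowels)
--     consonantbm = listOfSentence(keys,createListbmByWord)
--     tup += enterToATuple(consonantbm)
--     consonantnz = listOfSentence(keys,createListnzByWord)
--     tup += enterToATuple(consonantnz)
--     values = list(zip(*[(item) for item in tup]))
--     d = createDic(keys,values,{})
--     return tuple([lineNr])+(d,)
--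
-- def crateListVByWord(word,vowels = ['a','i','e','o','u']):
--     return list([word[i]  for i in range(0,len(word)) if word[i].lower() in vowels ])
--
-- def listOfSentence(line,func):
--     if len(line) == 0:
--         return []
--     return listOfSentence(line[:-1],func)+[func(line[-1])]
--
-- def  createListbmByWord(word,vowels = ['a','i','e','o','u']):
--     return list([word[i]  for i in range(0,len(word)) if word[i].lower()<='m' and word[i].lower()>='a' and not word[i].lower() in vowels])
--
-- def enterToATuple(L,x =[]):
--     return tuple([L]+x)
--
-- def createListnzByWord(word,vowels = ['a','i','e','o','u']):
--     return list([word[i]  for i in range(0,len(word)) if word[i].lower()<='z' and word[i].lower()>='n'and not word[i].lower() in vowels])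
--
-- def createDic(keys,values,dic):
--     if len(keys) == 0:
--         return dic
--     dic[keys[0]] = values[0]
--     return  createDic(keys[1:],values[1:],dic)
-- ===== SOURCE B (Python) =====
-- def treatLine(lineNr, line):
--     d = {}
--     vowels = ('a', 'i', 'e', 'o', 'u')
--     for word in line.split():
--         v, bm, nz = [], [], []
--         for ch in word:
--             c = ch.lower()
--             if c in vowels:
--                 v.append(ch)
--             elif 'a' <= c <= 'm':
--                 bm.append(ch)
--             elif 'n' <= c <= 'z':
--                 nz.append(ch)
--         d[word] = (v, bm, nz)
--     return (lineNr, d)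
-- ===== Notes on version B (the rewrite author's own statement) =====
-- stated objective: faster
-- what changed: Replaced three recursive per-word comprehension passes (each recursion copying line[:-1]) plus a zip transpose and a recursive dict builder with one direct loop that scans each word once into three buckets and assigns d[word] immediately.
import Mathlib
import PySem

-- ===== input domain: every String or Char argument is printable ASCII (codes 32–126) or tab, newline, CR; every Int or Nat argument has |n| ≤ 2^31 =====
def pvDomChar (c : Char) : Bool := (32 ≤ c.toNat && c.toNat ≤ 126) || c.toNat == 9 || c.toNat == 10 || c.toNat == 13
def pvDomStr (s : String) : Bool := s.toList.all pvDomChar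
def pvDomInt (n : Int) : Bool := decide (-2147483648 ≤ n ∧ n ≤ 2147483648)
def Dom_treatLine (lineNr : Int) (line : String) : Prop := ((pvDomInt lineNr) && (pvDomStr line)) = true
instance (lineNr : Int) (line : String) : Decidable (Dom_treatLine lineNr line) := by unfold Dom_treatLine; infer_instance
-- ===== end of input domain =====

-- B replaces A's three recursive per-word passes + zip transpose + recursive dict builder
-- with one direct per-word scan into three buckets (objective: simpler).

-- ===== PORT A =====
-- word[i].lower() in ['a','i','e','o','u']
def pvIsVowel (c : Char) : Bool :=
  ['a', 'i', 'e', 'o', 'u'].contains (PySem.Chars.lowerChar c)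

-- [word[i] for i in range(0,len(word)) if word[i].lower() in vowels]
def crateListVByWord (word : String) : List String :=
  (word.toList.filter pvIsVowel).map (fun c => String.mk [c])

-- [word[i] for i in range(0,len(word)) if word[i].lower()<='m' and word[i].lower()>='a' and not … in vowels]
def createListbmByWord (word : String) : List String :=
  (word.toList.filter
    (fun c => PySem.Chars.lowerChar c ≤ 'm' && 'a' ≤ PySem.Chars.lowerChar c && !pvIsVowel c)).map
    (fun c => String.mk [c])

-- [word[i] for i in range(0,len(word)) if word[i].lower()<='z' and word[i].lower()>='n' and not … in vowels]
def createListnzByWord (word : String) : List String :=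
  (word.toList.filter
    (fun c => PySem.Chars.lowerChar c ≤ 'z' && 'n' ≤ PySem.Chars.lowerChar c && !pvIsVowel c)).map
    (fun c => String.mk [c])

-- listOfSentence: recursion on line[:-1], appending func(line[-1])
def listOfSentence (l : List String) (f : String → List String) : List (List String) :=
  if h : l = [] then []
  else listOfSentence l.dropLast f ++ [f (l.getLast h)]
termination_by l.length
decreasing_by
  cases l with
  | nil => exact absurd rfl h
  | cons x xs => simp

-- zip(*tup) for the three-element tup (each row becomes the per-word triple, kept as a 3-list)
def pvZip3 (a b c : List (List String)) : List (List (List String)) :=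
  match a, b, c with
  | x :: a', y :: b', z :: c' => [x, y, z] :: pvZip3 a' b' c'
  | _, _, _ => []

-- createDic: recursive, dic[keys[0]] = values[0]; the unreachable length-mismatch arm returns dic
def createDic (keys : List String) (values : List (List (List String)))
    (dic : PySem.Dict String (List (List String))) : PySem.Dict String (List (List String)) :=
  match keys, values with
  | k :: ks, v :: vs => createDic ks vs (dic.insert k v)
  | _, _ => dic

def treatLine (lineNr : Int) (line : String) : Int × (List (String × List (List String))) :=
  let keys := PySem.Str.split₀ line
  let vowels := listOfSentence keys crateListVByWord
  let tup := [vowels]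
  let tup := tup ++ [listOfSentence keys createListbmByWord]
  let tup := tup ++ [listOfSentence keys createListnzByWord]
  let values := pvZip3 tup[0]! tup[1]! tup[2]!
  (lineNr, (createDic keys values PySem.Dict.empty).items)

-- ===== PORT B =====
-- single scan of a word: each character goes to the vowel, a–m or n–z bucket (appends = cons on the recursion's tail)
def pvBuckets (cs : List Char) : List String × List String × List String :=
  match cs with
  | [] => ([], [], [])
  | ch :: rest =>
    let (v, bm, nz) := pvBuckets rest
    let c := PySem.Chars.lowerChar ch
    if pvIsVowel ch then (String.mk [ch] :: v, bm, nz)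
    else if 'a' ≤ c && c ≤ 'm' then (v, String.mk [ch] :: bm, nz)
    else if 'n' ≤ c && c ≤ 'z' then (v, bm, String.mk [ch] :: nz)
    else (v, bm, nz)

def treatLine_alt (lineNr : Int) (line : String) : Int × (List (String × List (List String))) :=
  (lineNr,
    ((PySem.Str.split₀ line).foldl
      (fun d w =>
        let (v, bm, nz) := pvBuckets w.toList
        d.insert w [v, bm, nz])
      PySem.Dict.empty).items)

-- ===== PRECONDITION & SPEC =====
def Spec_treatLine (lineNr : Int) (line : String) (out : Int × (List (String × List (List String)))) : Prop := out = treatLine_alt lineNr line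
instance (lineNr : Int) (line : String) (out : Int × (List (String × List (List String)))) : Decidable (Spec_treatLine lineNr line out) := by unfold Spec_treatLine; infer_instance

-- ===== CLAIM (what is proved, stated in full; the proofs are below) =====
def Claim_equal_treatLine : Prop := ∀ (lineNr : Int) (line : String), Dom_treatLine lineNr line → Spec_treatLine lineNr line (treatLine lineNr line)

-- ===== LEMMAS AND PROOFS =====

theorem listOfSentence_eq_map (l : List String) (f : String → List String) :
    listOfSentence l f = l.map f := by
  induction l using List.reverseRecOn with
  | nil => rw [listOfSentence]; simp
  | append_singleton xs x ih =>
    rw [listOfSentence]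
    simp [ih]

theorem pvZip3_map (l : List String) (f g h : String → List String) :
    pvZip3 (l.map f) (l.map g) (l.map h) = l.map (fun w => [f w, g w, h w]) := by
  induction l with
  | nil => rfl
  | cons x xs ih => simp only [List.map_cons, pvZip3, ih]

theorem createDic_eq_foldl (keys : List String) (g : String → List (List String))
    (dic : PySem.Dict String (List (List String))) :
    createDic keys (keys.map g) dic = keys.foldl (fun d k => d.insert k (g k)) dic := by
  induction keys generalizing dic with
  | nil => rfl
  | cons k ks ih => simp [createDic, ih]

theorem pvBuckets_eq (cs : List Char) :
    pvBuckets cs =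
      ((cs.filter pvIsVowel).map (fun c => String.mk [c]),
       (cs.filter (fun c => PySem.Chars.lowerChar c ≤ 'm' && 'a' ≤ PySem.Chars.lowerChar c && !pvIsVowel c)).map (fun c => String.mk [c]),
       (cs.filter (fun c => PySem.Chars.lowerChar c ≤ 'z' && 'n' ≤ PySem.Chars.lowerChar c && !pvIsVowel c)).map (fun c => String.mk [c])) := by
  induction cs with
  | nil => rfl
  | cons ch rest ih =>
    simp only [pvBuckets, ih]
    rcases Bool.eq_false_or_eq_true (pvIsVowel ch) with hv | hv
    case _ => simp [hv]
    · by_cases h1 : 'a' ≤ PySem.Chars.lowerChar ch <;>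
      by_cases h2 : PySem.Chars.lowerChar ch ≤ 'm' <;>
      by_cases h3 : 'n' ≤ PySem.Chars.lowerChar ch <;>
      by_cases h4 : PySem.Chars.lowerChar ch ≤ 'z' <;>
      first
        | exact absurd (le_trans h3 h2) (by decide)
        | simp [hv, h1, h2, h3, h4]

-- ===== VERDICT (by name: the statement is the Claim_ definition above) =====
theorem treatLine_spec : Claim_equal_treatLine := by
  intro lineNr line _
  unfold Spec_treatLine treatLine treatLine_alt
  simp only [listOfSentence_eq_map, List.cons_append, List.nil_append,
    List.getElem!_cons_zero, List.getElem!_cons_succ]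
  rw [pvZip3_map, createDic_eq_foldl]
  have hfun :
      (fun (d : PySem.Dict String (List (List String))) k =>
          d.insert k [crateListVByWord k, createListbmByWord k, createListnzByWord k]) =
      (fun (d : PySem.Dict String (List (List String))) w =>
          let (v, bm, nz) := pvBuckets w.toList
          d.insert w [v, bm, nz]) := by
    funext d w
    rw [pvBuckets_eq]
    rfl
  rw [hfun]
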